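-- pv_equiv track=rewrite | github.com/juho5005/Programmers | Lv_1/05_덧칠하기.py | solution
-- ===== SOURCE A (Python) =====
-- from collections import deque
--
-- def solution(n, m, section):
--     # 페인트칠 하는 횟수
--     cnt = 0
--
--     # popleft()를 쓰기 위해 덱으로 변환
--     section = deque(section)
--
--     while section :
--         started_paint = section.popleft()
--         cnt += 1
--
--         # 칠하기로 한 벽이 페인트칠하는 롤러의 범위 내에 있을 때
--         while section and (started_paint <= section[0] < started_paint + m) :
--             section.popleft()
--
--     return cnt
-- ===== SOURCE B (Python) =====
-- def solution(n, m, section):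
--     cnt = 0
--     start = None
--     for s in section:
--         if start is None or not (start <= s < start + m):
--             cnt += 1
--             start = s
--     return cnt
-- ===== Notes on version B (the rewrite author's own statement) =====
-- stated objective: simpler
-- what changed: Replaced the deque with nested while-loops (popleft plus an inner skipping loop) by a single for-loop carrying the current roller start in a variable; no container mutation and no inner loop.
import Mathlib
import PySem

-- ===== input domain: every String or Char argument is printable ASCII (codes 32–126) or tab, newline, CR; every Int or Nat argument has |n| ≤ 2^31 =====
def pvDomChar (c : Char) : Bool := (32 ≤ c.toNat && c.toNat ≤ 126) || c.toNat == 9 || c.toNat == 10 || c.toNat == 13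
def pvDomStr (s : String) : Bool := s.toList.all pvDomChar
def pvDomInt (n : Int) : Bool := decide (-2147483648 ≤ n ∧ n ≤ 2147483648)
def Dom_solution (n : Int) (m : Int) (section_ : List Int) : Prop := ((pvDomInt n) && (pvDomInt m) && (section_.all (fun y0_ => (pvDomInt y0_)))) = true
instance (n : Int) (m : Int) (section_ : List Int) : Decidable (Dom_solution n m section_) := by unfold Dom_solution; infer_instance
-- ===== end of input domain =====

-- B replaces A's deque with nested popleft while-loops by a single for-loop
-- carrying the current roller start in a variable (objective: simpler).

-- ===== PORT A =====
-- inner while: pop from the front while the head lies in [started_paint, started_paint + m)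
def solInner (m started_paint : Int) : List Int → List Int
  | [] => []
  | s :: t => if started_paint ≤ s ∧ s < started_paint + m then solInner m started_paint t else s :: t

theorem solInner_length (m sp : Int) (l : List Int) : (solInner m sp l).length ≤ l.length := by
  induction l with
  | nil => simp [solInner]
  | cons s t ih =>
      simp only [solInner]
      split
      · exact le_trans ih (Nat.le_succ _)
      · simp

-- outer while: popleft a new start, cnt += 1, run the inner while
def solOuter (m : Int) : List Int → Int
  | [] => 0
  | s :: t => 1 + solOuter m (solInner m s t)
termination_by l => l.length
decreasing_by simpa using Nat.lt_succ_of_le (solInner_length m s t)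

def solution (n : Int) (m : Int) (section_ : List Int) : Int := solOuter m section_

-- ===== PORT B =====
-- single pass: state = (cnt, current roller start, initially none)
def solStep (m : Int) (st : Int × Option Int) (s : Int) : Int × Option Int :=
  match st.2 with
  | none => (st.1 + 1, some s)
  | some start => if start ≤ s ∧ s < start + m then st else (st.1 + 1, some s)

def solution_alt (n : Int) (m : Int) (section_ : List Int) : Int :=
  (section_.foldl (solStep m) (0, none)).1

-- ===== PRECONDITION & SPEC =====
def Spec_solution (n : Int) (m : Int) (section_ : List Int) (out : Int) : Prop := out = solution_alt n m section_
instance (n : Int) (m : Int) (section_ : List Int) (out : Int) : Decidable (Spec_solution n m section_ out) := by unfold Spec_solution; infer_instance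

-- ===== CLAIM (what is proved, stated in full; the proofs are below) =====
def Claim_equal_solution : Prop := ∀ (n : Int) (m : Int) (section_ : List Int), Dom_solution n m section_ → Spec_solution n m section_ (solution n m section_)

-- ===== LEMMAS AND PROOFS =====

-- loop invariant: folding B's step from (c, some start) over l adds exactly the
-- number of rollers A spends on l after a roller was just started at `start`.
theorem solFold_some (m : Int) (l : List Int) : ∀ (c start : Int),
    (l.foldl (solStep m) (c, some start)).1 = c + solOuter m (solInner m start l) := by
  induction l with
  | nil => intro c start; simp [solInner, solOuter]
  | cons s t ih =>
      intro c start
      by_cases h : start ≤ s ∧ s < start + m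
      · simp [List.foldl_cons, solStep, h, ih, solInner]
      · have h1 : solInner m start (s :: t) = s :: t := by simp [solInner, h]
        have h2 : solOuter m (s :: t) = 1 + solOuter m (solInner m s t) := by
          rw [solOuter]
        simp only [List.foldl_cons, solStep, h, if_false, h1, h2, ih]
        ring

-- ===== VERDICT (by name: the statement is the Claim_ definition above) =====
theorem solution_spec : Claim_equal_solution := by
  intro n m section_ _
  unfold Spec_solution solution solution_alt
  cases section_ with
  | nil => simp [solOuter]
  | cons s t =>
      rw [solOuter]
      simp only [List.foldl_cons, solStep, solFold_some]
      ring
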